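-- pv_equiv track=rewrite | github.com/Ashura5/TreeEval | common/utils.py | extract_type_from_text_string
-- ===== SOURCE A (Python) =====
-- def find_str(s, s1, s2):
--     pos1 = s.rfind(s1)
--     pos2 = s.rfind(s2)
--     if pos1 == -1 and pos2 == -1:
--         return "tie"
--     elif pos1 == -1:
--         return s2
--     elif pos2 == -1:
--         return s1
--     else:
--         return s2 if pos2 > pos1 else s1
--
-- def extract_type_from_text_string(text_str: str):
--     try:
--         if "question_type" in text_str:
--             new_text_str = text_str.split("question_type")[-1]
--             new_text_str = "".join(
--                 char.lower() for char in new_text_str if char.isalnum()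
--             )
--         else:
--             new_text_str = "".join(char.lower() for char in text_str if char.isalnum())
--         res = find_str(new_text_str, "response1", "response2")
--         if "response1" == res:
--             return "Response 1"
--         if "response2" == res:
--             return "Response 2"
--         if "tie" == res:
--             return "Tie"
--         return "Tie"
--     except:
--         return "Tie"
-- ===== SOURCE B (Python) =====
-- def extract_type_from_text_string(text_str: str):
--     # One left-to-right scan that remembers the LAST response marker seen,
--     # instead of two rfind scans plus a four-way branch.
--     if "question_type" in text_str:
--         text_str = text_str.split("question_type")[-1]
--     cleaned = "".join(ch.lower() for ch in text_str if ch.isalnum())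
--     last = None
--     for i in range(len(cleaned)):
--         seg = cleaned[i:i + 9]
--         if seg == "response1":
--             last = "1"
--         elif seg == "response2":
--             last = "2"
--     if last == "1":
--         return "Response 1"
--     if last == "2":
--         return "Response 2"
--     return "Tie"
-- ===== Notes on version B (the rewrite author's own statement) =====
-- stated objective: alternative
-- what changed: Replaced the two-rfind helper and its four-way branch by a single left-to-right scan over the cleaned string that remembers the last response marker seen; markers cannot overlap, so the last one seen equals the rightmost rfind.
import Mathlib
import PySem

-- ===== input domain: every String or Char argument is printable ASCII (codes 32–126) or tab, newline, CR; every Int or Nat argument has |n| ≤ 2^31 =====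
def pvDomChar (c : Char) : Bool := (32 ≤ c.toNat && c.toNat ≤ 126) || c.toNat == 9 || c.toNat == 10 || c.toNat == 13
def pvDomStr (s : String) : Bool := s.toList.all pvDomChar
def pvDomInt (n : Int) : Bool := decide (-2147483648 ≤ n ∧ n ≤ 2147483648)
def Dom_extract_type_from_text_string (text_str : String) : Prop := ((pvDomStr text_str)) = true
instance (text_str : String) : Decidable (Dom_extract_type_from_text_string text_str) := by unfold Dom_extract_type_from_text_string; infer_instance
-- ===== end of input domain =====

-- B replaces A's two rfind scans + four-way branch by one forward scan that keeps the
-- last response marker seen (alternative decomposition, same cost).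

-- ===== PORT A =====
-- find_str(s, s1, s2): two rfinds and a four-way branch
def pv_find_str (s s1 s2 : List Char) : List Char :=
  let pos1 := PySem.Chars.rfind s s1
  let pos2 := PySem.Chars.rfind s s2
  if pos1 = -1 ∧ pos2 = -1 then "tie".toList
  else if pos1 = -1 then s2
  else if pos2 = -1 then s1
  else if pos2 > pos1 then s2 else s1

def extract_type_from_text_string (text_str : String) : String :=
  let cs := text_str.toList
  -- the try/except in A can never fire on a str input: all operations used are total
  let new_text_str :=
    if PySem.Chars.isIn "question_type".toList cs then
      -- text_str.split("question_type")[-1]; split always returns a nonempty list,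
      -- so the [-1] IndexError case (the .getD default) is unreachable
      (((PySem.List.pyGet? (PySem.Chars.splitOn cs "question_type".toList) (-1)).getD []).filter
          PySem.Chars.isalnum).map PySem.Chars.lowerChar
    else (cs.filter PySem.Chars.isalnum).map PySem.Chars.lowerChar
  let res := pv_find_str new_text_str "response1".toList "response2".toList
  if res = "response1".toList then "Response 1"
  else if res = "response2".toList then "Response 2"
  else if res = "tie".toList then "Tie"
  else "Tie"

-- ===== PORT B =====
-- the for-i loop of Source B: at each position compare the 9-char slice, remember the last hit
def pvScanLast : List Char → Option Char → Option Char
  | [], last => last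
  | c :: rest, last =>
      pvScanLast rest
        (if PySem.Chars.startswith (c :: rest) "response1".toList then some '1'
         else if PySem.Chars.startswith (c :: rest) "response2".toList then some '2'
         else last)

def extract_type_from_text_string_alt (text_str : String) : String :=
  let cs := text_str.toList
  let src :=
    if PySem.Chars.isIn "question_type".toList cs then
      (PySem.List.pyGet? (PySem.Chars.splitOn cs "question_type".toList) (-1)).getD []
    else cs
  let cleaned := (src.filter PySem.Chars.isalnum).map PySem.Chars.lowerChar
  let last := pvScanLast cleaned none
  if last = some '1' then "Response 1"
  else if last = some '2' then "Response 2"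
  else "Tie"

-- ===== PRECONDITION & SPEC =====
def Spec_extract_type_from_text_string (text_str : String) (out : String) : Prop := out = extract_type_from_text_string_alt text_str
instance (text_str : String) (out : String) : Decidable (Spec_extract_type_from_text_string text_str out) := by unfold Spec_extract_type_from_text_string; infer_instance

-- ===== CLAIM (what is proved, stated in full; the proofs are below) =====
def Claim_equal_extract_type_from_text_string : Prop := ∀ (text_str : String), Dom_extract_type_from_text_string text_str → Spec_extract_type_from_text_string text_str (extract_type_from_text_string text_str)

-- ===== LEMMAS AND PROOFS =====

theorem pv_neg_one_le_go (s sub : List Char) (k : Nat) :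
    -1 ≤ PySem.Chars.rfind.go s sub k := by
  induction k with
  | zero => simp [PySem.Chars.rfind.go]; split <;> omega
  | succ j ih =>
      simp [PySem.Chars.rfind.go] at ih ⊢
      split
      · omega
      · exact ih

theorem pv_neg_one_le_rfind (s sub : List Char) : -1 ≤ PySem.Chars.rfind s sub := by
  simpa [PySem.Chars.rfind] using pv_neg_one_le_go s sub s.length

theorem pv_go_cons (c : Char) (l sub : List Char) (k : Nat) :
    PySem.Chars.rfind.go (c :: l) sub (k + 1) =
      if PySem.Chars.rfind.go l sub k = -1 then
        (if sub.isPrefixOf (c :: l) then 0 else -1)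
      else PySem.Chars.rfind.go l sub k + 1 := by
  induction k with
  | zero =>
      simp only [PySem.Chars.rfind.go, List.drop_succ_cons, List.drop_zero]
      split_ifs <;> simp_all
  | succ j ih =>
      have hd : List.drop (j + 2) (c :: l) = List.drop (j + 1) l := by
        simp [List.drop_succ_cons]
      simp only [PySem.Chars.rfind.go] at ih ⊢
      rw [hd]
      split_ifs with h1 h2
      all_goals simp_all
      all_goals omega

theorem pv_rfind_cons (c : Char) (l sub : List Char) :
    PySem.Chars.rfind (c :: l) sub =
      if PySem.Chars.rfind l sub = -1 then
        (if sub.isPrefixOf (c :: l) then 0 else -1)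
      else PySem.Chars.rfind l sub + 1 := by
  simpa [PySem.Chars.rfind] using pv_go_cons c l sub l.length

-- A-shaped characterisation of the scan's accumulator
def pvF (l : List Char) (acc : Option Char) : Option Char :=
  if PySem.Chars.rfind l "response1".toList = -1 ∧ PySem.Chars.rfind l "response2".toList = -1 then acc
  else if PySem.Chars.rfind l "response1".toList = -1 then some '2'
  else if PySem.Chars.rfind l "response2".toList = -1 then some '1'
  else if PySem.Chars.rfind l "response2".toList > PySem.Chars.rfind l "response1".toList then some '2'
  else some '1'

theorem pv_scan_eq_F : ∀ (l : List Char) (acc : Option Char), pvScanLast l acc = pvF l acc := by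
  intro l
  induction l with
  | nil =>
      intro acc
      simp [pvScanLast, pvF, PySem.Chars.rfind, PySem.Chars.rfind.go]
  | cons c rest ih =>
      intro acc
      have h1 := pv_neg_one_le_rfind rest "response1".toList
      have h2 := pv_neg_one_le_rfind rest "response2".toList
      rw [pvScanLast, ih]
      clear ih
      unfold pvF
      rw [pv_rfind_cons c rest "response1".toList, pv_rfind_cons c rest "response2".toList]
      simp only [PySem.Chars.startswith]
      generalize hA1 : PySem.Chars.rfind rest "response1".toList = a1 at h1 ⊢
      generalize hA2 : PySem.Chars.rfind rest "response2".toList = a2 at h2 ⊢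
      split_ifs <;>
        first
          | rfl
          | omega
          | exact ‹False›.elim
          | exact (‹False ∧ False›).1.elim
          | exact (‹False ∧ (-1 : Int) = -1›).1.elim
          | exact (‹(-1 : Int) = -1 ∧ False›).2.elim

-- the two classifiers agree whenever (res, d) is one of the three matched outcome pairs
theorem pv_classify_agree (res : List Char) (d : Option Char)
    (h : (res = "tie".toList ∧ d = none) ∨ (res = "response1".toList ∧ d = some '1') ∨
         (res = "response2".toList ∧ d = some '2')) :
    (if res = "response1".toList then "Response 1"
     else if res = "response2".toList then "Response 2"
     else if res = "tie".toList then "Tie" else "Tie")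
    = (if d = some '1' then "Response 1"
       else if d = some '2' then "Response 2" else "Tie") := by
  rcases h with ⟨h1, h2⟩ | ⟨h1, h2⟩ | ⟨h1, h2⟩ <;> subst h1 <;> subst h2 <;> decide

-- the final classification of A (over find_str) and of B (over the scan) agree
theorem pv_last (l : List Char) :
    (if pv_find_str l "response1".toList "response2".toList = "response1".toList then "Response 1"
     else if pv_find_str l "response1".toList "response2".toList = "response2".toList then "Response 2"
     else if pv_find_str l "response1".toList "response2".toList = "tie".toList then "Tie"
     else "Tie")
    = (if pvScanLast l none = some '1' then "Response 1"
       else if pvScanLast l none = some '2' then "Response 2"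
       else "Tie") := by
  rw [pv_scan_eq_F]
  apply pv_classify_agree
  simp only [pv_find_str, pvF]
  split_ifs
  all_goals decide

theorem extract_type_spec_aux (text_str : String) :
    extract_type_from_text_string text_str = extract_type_from_text_string_alt text_str := by
  unfold extract_type_from_text_string extract_type_from_text_string_alt
  cases hq : PySem.Chars.isIn "question_type".toList text_str.toList with
  | true =>
      simp only [hq, if_true]
      exact pv_last _
  | false =>
      simp only [hq, Bool.false_eq_true, if_false]
      exact pv_last _

-- ===== VERDICT (by name: the statement is the Claim_ definition above) =====
theorem extract_type_from_text_string_spec : Claim_equal_extract_type_from_text_string := by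
  intro text_str _
  unfold Spec_extract_type_from_text_string
  exact extract_type_spec_aux text_str
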